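-- pv_equiv track=rewrite | github.com/hello-world0421/Algorithm-Code-Repository | tian_ti_sai/L1-050-2.py | fuction
-- ===== SOURCE A (Python) =====
-- import string
--
-- def fuction(L, N):
--     alphabet = string.ascii_lowercase
--     base = len(alphabet)
--     total_strings = base ** L
--     sequences = []
--
--     for i in range(total_strings - N + 1):
--         sequence = ''
--         temp = i
--         for _ in range(L):
--             sequence = alphabet[temp % base] + sequence
--             temp //= base
--         sequences.append(sequence)
--
--     return sequences
-- ===== SOURCE B (Python) =====
-- def fuction(L, N):
--     # Odometer enumeration: keep the current string's characters and step them
--     # in place like an odometer, instead of converting each index i to base 26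
--     # with divmod from scratch.
--     count = 26 ** L - N + 1
--     chars = ['a'] * L
--     out = []
--     for _ in range(count):
--         out.append(''.join(chars))
--         for j in range(L - 1, -1, -1):
--             if chars[j] == 'z':
--                 chars[j] = 'a'
--             else:
--                 chars[j] = chr(ord(chars[j]) + 1)
--                 break
--     return out
-- ===== Notes on version B (the rewrite author's own statement) =====
-- stated objective: alternative
-- what changed: Replaces per-index base-26 conversion (L divmods and L string prepends for every index) with an in-place character odometer that is stepped once per output string, so each string costs amortized O(1) increments plus one join.
import Mathlib
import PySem

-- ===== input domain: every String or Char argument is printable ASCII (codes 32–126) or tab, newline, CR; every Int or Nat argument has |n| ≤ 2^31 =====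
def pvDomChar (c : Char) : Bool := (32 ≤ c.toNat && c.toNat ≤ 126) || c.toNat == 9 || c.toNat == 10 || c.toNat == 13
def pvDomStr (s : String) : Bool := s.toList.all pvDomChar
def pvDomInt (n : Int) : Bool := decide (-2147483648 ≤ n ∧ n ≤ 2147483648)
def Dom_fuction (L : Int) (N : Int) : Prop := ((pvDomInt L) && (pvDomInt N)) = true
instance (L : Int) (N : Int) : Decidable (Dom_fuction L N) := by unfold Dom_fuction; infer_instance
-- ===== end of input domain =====

-- B replaces A's per-index base-26 divmod conversion with an in-place character
-- odometer stepped once per output string (alternative algorithm, same asymptotic cost).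

-- ===== PORT A =====
-- A: for each i in range(26**L - N + 1), build the L-digit base-26 string of i
-- by repeated % and // (prepending characters).  Exponent uses L.toNat: faithful
-- on Pre_ (0 ≤ L); for negative L the Python raises and nothing is claimed.
def fuction (L : Int) (N : Int) : List String :=
  let alphabet : String := "abcdefghijklmnopqrstuvwxyz"
  let base : Int := 26
  let total_strings : Int := base ^ L.toNat
  (PySem.List.pyRange 0 (total_strings - N + 1) 1).foldl
    (fun seqs i =>
      let p := (PySem.List.pyRange 0 L 1).foldl
        (fun (st : String × Int) _ =>
          -- alphabet[temp % base]: the index is always in [0, 26), so pyGet? is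
          -- always `some`; the 'a' default is never used.
          (((PySem.Str.pyGet? alphabet (PySem.Int.mod st.2 base)).getD 'a').toString ++ st.1,
           PySem.Int.floordiv st.2 base))
        ("", i)
      seqs ++ [p.1]) []

-- ===== PORT B =====
-- B's inner `for j in range(L-1, -1, -1): … break` walks the char list from its
-- right end; pvOdoStep is that walk written as recursion on the reversed list.
def pvOdoStep : List Char → List Char
  | [] => []
  | c :: t => if c == 'z' then 'a' :: pvOdoStep t else Char.ofNat (c.toNat + 1) :: t

def fuction_alt (L : Int) (N : Int) : List String :=
  let count : Int := (26 : Int) ^ L.toNat - N + 1   -- 26 ** L; L.toNat faithful on Pre_ (0 ≤ L)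
  ((PySem.List.pyRange 0 count 1).foldl
    (fun (st : List String × List Char) _ =>
      (st.1 ++ [String.ofList st.2], (pvOdoStep st.2.reverse).reverse))
    ([], List.replicate L.toNat 'a')).1

-- ===== PRECONDITION & SPEC =====
-- Python A raises TypeError when L < 0 (26**L is a float, range() rejects it); B does too.
def Pre_fuction (L : Int) (N : Int) : Prop := 0 ≤ L
instance (L : Int) (N : Int) : Decidable (Pre_fuction L N) := by unfold Pre_fuction; infer_instance
def pvWitness_fuction : Int × Int := (1, 20)

def Spec_fuction (L : Int) (N : Int) (out : List String) : Prop := out = fuction_alt L N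
instance (L : Int) (N : Int) (out : List String) : Decidable (Spec_fuction L N out) := by unfold Spec_fuction; infer_instance

-- ===== CLAIM (what is proved, stated in full; the proofs are below) =====
def Claim_equal_fuction : Prop := ∀ (L : Int) (N : Int), Dom_fuction L N → Pre_fuction L N → Spec_fuction L N (fuction L N)

-- ===== LEMMAS AND PROOFS =====

-- the d-th lowercase letter
def pvCh (d : Nat) : Char := ("abcdefghijklmnopqrstuvwxyz".toList).getD d 'a'

-- least-significant-first base-26 character digits of i, k of them
def pvDigits : Nat -> Nat -> List Char
  | 0, _ => []
  | k + 1, i => pvCh (i % 26) :: pvDigits k (i / 26)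

theorem pv_alpha_get (m : Nat) (h : m < 26) :
    ("abcdefghijklmnopqrstuvwxyz".toList)[m]? = some (pvCh m) := by
  interval_cases m <;> decide

theorem pv_ch_succ (m : Nat) (h : m < 25) : Char.ofNat ((pvCh m).toNat + 1) = pvCh (m + 1) := by
  interval_cases m <;> decide

theorem pv_digits_zero (k : Nat) : pvDigits k 0 = List.replicate k 'a' := by
  induction k with
  | zero => rfl
  | succ k ih => simpa [pvDigits, List.replicate_succ, ih] using by decide

theorem pv_digits_snoc (k : Nat) : forall i, pvDigits (k + 1) i = pvDigits k i ++ [pvCh (i / 26 ^ k % 26)] := by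
  induction k with
  | zero => intro i; simp [pvDigits]
  | succ k ih =>
    intro i
    show pvCh (i % 26) :: pvDigits (k + 1) (i / 26) = _
    rw [ih (i / 26)]
    simp [pvDigits, Nat.div_div_eq_div_mul, pow_succ']

-- the odometer step is the successor on digit lists
theorem pv_step_succ (k : Nat) : forall i, pvOdoStep (pvDigits k i) = pvDigits k (i + 1) := by
  induction k with
  | zero => intro i; rfl
  | succ k ih =>
    intro i
    show pvOdoStep (pvCh (i % 26) :: pvDigits k (i / 26)) = pvDigits (k + 1) (i + 1)
    by_cases h25 : i % 26 = 25
    · have h1 : (i + 1) % 26 = 0 := by omega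
      have h2 : (i + 1) / 26 = i / 26 + 1 := by omega
      rw [h25]
      simp only [pvOdoStep, if_pos (show (pvCh 25 == 'z') = true from by decide), ih]
      show _ = pvCh ((i + 1) % 26) :: pvDigits k ((i + 1) / 26)
      rw [h1, h2, show pvCh 0 = 'a' from by decide]
    · have hm : i % 26 < 25 := by omega
      have h1 : (i + 1) % 26 = i % 26 + 1 := by omega
      have h2 : (i + 1) / 26 = i / 26 := by omega
      simp only [pvOdoStep, if_neg (show ¬ (pvCh (i % 26) == 'z') = true from by
        interval_cases h : (i % 26) <;> simp_all <;> decide)]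
      show _ = pvCh ((i + 1) % 26) :: pvDigits k ((i + 1) / 26)
      rw [h1, h2, pv_ch_succ _ hm]

-- A's inner digit loop, fully characterised
theorem pv_innerA (k : Nat) : forall (i : Nat) (s : String),
    (PySem.List.pyRange 0 (k : Int) 1).foldl
      (fun (st : String × Int) _ =>
        (((PySem.Str.pyGet? "abcdefghijklmnopqrstuvwxyz" (PySem.Int.mod st.2 26)).getD 'a').toString ++ st.1,
         PySem.Int.floordiv st.2 26))
      (s, (i : Int))
    = (String.ofList (pvDigits k i).reverse ++ s, ((i / 26 ^ k : Nat) : Int)) := by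
  induction k with
  | zero =>
    intro i s
    rw [PySem.List.pyRange_one_eq_nil (by omega)]
    simp [pvDigits]
  | succ k ih =>
    intro i s
    rw [show (((k + 1 : Nat)) : Int) = (k : Int) + 1 from by push_cast; ring,
        PySem.List.pyRange_one_succ_right (by positivity), List.foldl_append, ih]
    have hm : i / 26 ^ k % 26 < 26 := Nat.mod_lt _ (by norm_num)
    have e1 : PySem.Int.mod ((i / 26 ^ k : Nat) : Int) 26 = ((i / 26 ^ k % 26 : Nat) : Int) := by
      rw [PySem.Int.mod_eq_emod_of_pos (by norm_num)]; omega
    have e2 : PySem.Int.floordiv ((i / 26 ^ k : Nat) : Int) 26 = ((i / 26 ^ (k + 1) : Nat) : Int) := by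
      rw [PySem.Int.floordiv_eq_ediv_of_pos (by norm_num), pow_succ, ← Nat.div_div_eq_div_mul]; omega
    simp only [List.foldl_cons, List.foldl_nil, e1, e2, PySem.Str.pyGet?_natCast,
      pv_alpha_get _ hm, Option.getD_some, Prod.mk.injEq]
    refine ⟨?_, trivial⟩
    apply String.toList_inj.mp
    simp [pv_digits_snoc, Char.toString]

-- B's outer loop, fully characterised
theorem pv_outerB (Ln : Nat) (n : Nat) :
    (PySem.List.pyRange 0 (n : Int) 1).foldl
      (fun (st : List String × List Char) _ =>
        (st.1 ++ [String.ofList st.2], (pvOdoStep st.2.reverse).reverse))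
      ([], (pvDigits Ln 0).reverse)
    = ((List.range n).map (fun j => String.ofList (pvDigits Ln j).reverse), (pvDigits Ln n).reverse) := by
  induction n with
  | zero => rw [PySem.List.pyRange_one_eq_nil (by omega)]; simp
  | succ n ih =>
    rw [show (((n + 1 : Nat)) : Int) = (n : Int) + 1 from by push_cast; ring,
        PySem.List.pyRange_one_succ_right (by positivity), List.foldl_append, ih]
    simp [List.range_succ, pv_step_succ]

-- A's outer loop, fully characterised
theorem pv_outerA (Ln : Nat) (n : Nat) :
    (PySem.List.pyRange 0 (n : Int) 1).foldl
      (fun seqs i =>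
        seqs ++ [((PySem.List.pyRange 0 (Ln : Int) 1).foldl
          (fun (st : String × Int) _ =>
            (((PySem.Str.pyGet? "abcdefghijklmnopqrstuvwxyz" (PySem.Int.mod st.2 26)).getD 'a').toString ++ st.1,
             PySem.Int.floordiv st.2 26))
          ("", i)).1]) []
    = (List.range n).map (fun j => String.ofList (pvDigits Ln j).reverse) := by
  induction n with
  | zero =>
    rw [show PySem.List.pyRange 0 (((0 : Nat) : Int)) 1 = [] from PySem.List.pyRange_one_eq_nil (by simp)]
    simp
  | succ n ih =>
    rw [show (((n + 1 : Nat)) : Int) = (n : Int) + 1 from by push_cast; ring,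
        PySem.List.pyRange_one_succ_right (by positivity), List.foldl_append, ih]
    simp only [List.foldl_cons, List.foldl_nil, pv_innerA Ln n "", List.range_succ, List.map_append]
    congr 2
    exact String.toList_inj.mp (by simp)

-- ===== VERDICT (by name: the statement is the Claim_ definition above) =====
theorem fuction_spec : Claim_equal_fuction := by
  intro L N _ hL
  obtain ⟨Ln, rfl⟩ : ∃ n : Nat, L = (n : Int) := ⟨L.toNat, (Int.toNat_of_nonneg hL).symm⟩
  show fuction (Ln : Int) N = fuction_alt (Ln : Int) N
  unfold fuction fuction_alt
  simp only [Int.toNat_natCast]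
  by_cases hneg : ((26 : Int) ^ Ln - N + 1) ≤ 0
  · rw [PySem.List.pyRange_one_eq_nil hneg]
    rfl
  · rw [show ((26 : Int) ^ Ln - N + 1) = ((((26 : Int) ^ Ln - N + 1).toNat : Nat) : Int) from by omega]
    rw [show List.replicate Ln 'a' = (pvDigits Ln 0).reverse from by
          rw [pv_digits_zero]; simp,
        pv_outerA Ln, pv_outerB Ln]
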